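-- pv_equiv track=rewrite | github.com/embed111/workflow_code | scripts/acceptance/run_acceptance_training_loop_evolution.py | pick_training_agent
-- ===== SOURCE A (Python) =====
-- from typing import Any
--
-- def pick_training_agent(items: list[dict[str, Any]]) -> dict[str, Any] | None:
--     rows = [row for row in items if isinstance(row, dict)]
--     for preferred_id in ("Analyst2",):
--         for row in rows:
--             if str(row.get("agent_id") or "").strip() == preferred_id:
--                 return row
--     for row in rows:
--         if str(row.get("agent_id") or "").strip() != "Analyst":
--             return row
--     return rows[0] if rows else None
-- ===== SOURCE B (Python) =====
-- def pick_training_agent(items):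
--     # Single pass keeping three "first hit" references instead of three scans.
--     a2 = non_analyst = first = None
--     for row in items:
--         if not isinstance(row, dict):
--             continue
--         aid = str(row.get("agent_id") or "").strip()
--         if first is None:
--             first = row
--         if a2 is None and aid == "Analyst2":
--             a2 = row
--         if non_analyst is None and aid != "Analyst":
--             non_analyst = row
--     if a2 is not None:
--         return a2
--     if non_analyst is not None:
--         return non_analyst
--     return first
-- ===== Notes on version B (the rewrite author's own statement) =====
-- stated objective: alternative
-- what changed: Replaces A's three sequential scans (Analyst2 pass, non-Analyst pass, rows[0] fallback) with a single loop maintaining three set-once references and a final preference cascade.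
import Mathlib
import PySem

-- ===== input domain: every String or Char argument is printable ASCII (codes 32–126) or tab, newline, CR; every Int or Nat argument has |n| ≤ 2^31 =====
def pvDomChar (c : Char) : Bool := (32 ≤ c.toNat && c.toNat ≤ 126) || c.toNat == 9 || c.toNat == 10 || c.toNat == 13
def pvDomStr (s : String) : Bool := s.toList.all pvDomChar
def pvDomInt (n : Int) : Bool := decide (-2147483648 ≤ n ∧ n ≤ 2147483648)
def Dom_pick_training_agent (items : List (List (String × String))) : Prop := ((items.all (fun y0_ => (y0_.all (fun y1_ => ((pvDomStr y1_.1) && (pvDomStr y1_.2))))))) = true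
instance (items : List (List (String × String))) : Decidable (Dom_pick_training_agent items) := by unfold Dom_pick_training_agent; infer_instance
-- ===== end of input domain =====

-- ===== PORT A =====
-- B is an alternative single-pass decomposition of A's three sequential scans; same O(n) cost.
-- Under the type convention every row is a dict, so A's isinstance filter is the identity.
-- row.get("agent_id") -> first match in the association list; `or ""` maps None and "" to "".
def pvNorm (row : List (String × String)) : String :=
  PySem.Str.strip (((row.find? (fun kv => kv.1 == "agent_id")).map Prod.snd).getD "")

def pick_training_agent (items : List (List (String × String))) : Option (List (String × String)) :=
  let rows := items
  match rows.find? (fun row => pvNorm row == "Analyst2") with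
  | some row => some row
  | none =>
    match rows.find? (fun row => pvNorm row != "Analyst") with
    | some row => some row
    | none => rows.head?

-- ===== PORT B =====
-- one-pass state: (first Analyst2 row, first non-Analyst row, first row), each set once
def pvStep (st : Option (List (String × String)) × Option (List (String × String)) × Option (List (String × String)))
    (row : List (String × String)) :
    Option (List (String × String)) × Option (List (String × String)) × Option (List (String × String)) :=
  let aid := pvNorm row
  let first := if st.2.2.isNone then some row else st.2.2
  let a2 := if st.1.isNone && (aid == "Analyst2") then some row else st.1
  let non := if st.2.1.isNone && (aid != "Analyst") then some row else st.2.1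
  (a2, non, first)

def pick_training_agent_alt (items : List (List (String × String))) : Option (List (String × String)) :=
  let st := items.foldl pvStep (none, none, none)
  match st.1 with
  | some row => some row
  | none =>
    match st.2.1 with
    | some row => some row
    | none => st.2.2

-- ===== PRECONDITION & SPEC =====
def Spec_pick_training_agent (items : List (List (String × String))) (out : Option (List (String × String))) : Prop := out = pick_training_agent_alt items
instance (items : List (List (String × String))) (out : Option (List (String × String))) : Decidable (Spec_pick_training_agent items out) := by unfold Spec_pick_training_agent; infer_instance

-- ===== CLAIM (what is proved, stated in full; the proofs are below) =====
def Claim_equal_pick_training_agent : Prop := ∀ (items : List (List (String × String))), Dom_pick_training_agent items → Spec_pick_training_agent items (pick_training_agent items)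

-- ===== LEMMAS AND PROOFS =====

theorem pvFold_char (rows : List (List (String × String)))
    (st : Option (List (String × String)) × Option (List (String × String)) × Option (List (String × String))) :
    rows.foldl pvStep st =
      ((st.1.or (rows.find? (fun row => pvNorm row == "Analyst2"))),
       (st.2.1.or (rows.find? (fun row => pvNorm row != "Analyst"))),
       (st.2.2.or rows.head?)) := by
  induction rows generalizing st with
  | nil => simp
  | cons r rs ih =>
    obtain ⟨a2, non, first⟩ := st
    simp only [List.foldl_cons, ih, pvStep, List.find?_cons, List.head?_cons]
    cases h2 : (pvNorm r == "Analyst2") <;>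
      cases hn : (pvNorm r != "Analyst") <;>
        cases a2 <;> cases non <;> cases first <;>
          simp_all [Option.or]

-- ===== VERDICT (by name: the statement is the Claim_ definition above) =====
theorem pick_training_agent_spec : Claim_equal_pick_training_agent := by
  intro items _
  unfold Spec_pick_training_agent pick_training_agent pick_training_agent_alt
  rw [pvFold_char]
  cases h2 : items.find? (fun row => pvNorm row == "Analyst2") <;>
    cases hn : items.find? (fun row => pvNorm row != "Analyst") <;>
      simp [h2, hn, Option.or]
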